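-- pv_equiv track=rewrite | github.com/gbusch/AdventOfCode | 2022/day08.py | is_shorter
-- ===== SOURCE A (Python) =====
-- from typing import List
--
-- def is_shorter(trees: List[int], center: int) -> List:
--     tree_list = []
--     for tree in trees:
--         if tree < center:
--             tree_list.append(1)
--         else:
--             tree_list.append(1)
--             break
--     return tree_list
-- ===== SOURCE B (Python) =====
-- def is_shorter(trees, center):
--     # Collect every blocking index in one full pass (no early exit),
--     # then the view length is the smallest blocker + 1, or the whole row.
--     blockers = [i for i, t in enumerate(trees) if t >= center]
--     length = min(blockers) + 1 if blockers else len(trees)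
--     return [1] * length
-- ===== Notes on version B (the rewrite author's own statement) =====
-- stated objective: alternative
-- what changed: Instead of A's early-exit loop that appends 1 per element and breaks at the first blocker, B makes one full pass collecting ALL blocking indices, takes the minimum of that set (or the list length if empty), and builds the answer by list multiplication.
import Mathlib
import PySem

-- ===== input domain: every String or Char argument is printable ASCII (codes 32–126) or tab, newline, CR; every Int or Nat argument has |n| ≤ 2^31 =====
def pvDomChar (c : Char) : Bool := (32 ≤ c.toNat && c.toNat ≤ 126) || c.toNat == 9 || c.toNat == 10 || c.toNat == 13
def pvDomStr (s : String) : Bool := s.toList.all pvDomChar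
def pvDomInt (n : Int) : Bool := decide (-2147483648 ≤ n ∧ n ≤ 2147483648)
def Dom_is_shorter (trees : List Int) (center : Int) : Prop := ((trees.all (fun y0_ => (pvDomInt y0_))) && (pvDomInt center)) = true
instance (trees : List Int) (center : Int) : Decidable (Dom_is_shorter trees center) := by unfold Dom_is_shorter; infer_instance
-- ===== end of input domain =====

-- B collects all blocking indices in one full pass, takes their minimum, and builds [1] * length; A loops with break (objective: alternative).
-- ===== PORT A =====
-- loop: append 1; break when tree >= center
def isShorterLoopA (trees : List Int) (center : Int) (tree_list : List Int) : List Int :=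
  match trees with
  | [] => tree_list
  | tree :: rest =>
    if tree < center then isShorterLoopA rest center (tree_list ++ [1])
    else tree_list ++ [1]

def is_shorter (trees : List Int) (center : Int) : List Int :=
  isShorterLoopA trees center []

-- ===== PORT B =====
-- comprehension [i for i, t in enumerate(trees) if t >= center], index carried explicitly
def blockersB (i : Nat) (trees : List Int) (center : Int) : List Nat :=
  match trees with
  | [] => []
  | t :: rest =>
    if t ≥ center then i :: blockersB (i + 1) rest center
    else blockersB (i + 1) rest center

def is_shorter_alt (trees : List Int) (center : Int) : List Int :=
  let blockers := blockersB 0 trees center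
  let length :=
    match blockers.min? with
    | some m => m + 1
    | none => trees.length
  List.replicate length (1 : Int)

-- ===== PRECONDITION & SPEC =====
def Spec_is_shorter (trees : List Int) (center : Int) (out : List Int) : Prop := out = is_shorter_alt trees center
instance (trees : List Int) (center : Int) (out : List Int) : Decidable (Spec_is_shorter trees center out) := by unfold Spec_is_shorter; infer_instance

-- ===== CLAIM =====
def Claim_equal_is_shorter : Prop := ∀ (trees : List Int) (center : Int), Dom_is_shorter trees center → Spec_is_shorter trees center (is_shorter trees center)

-- ===== LEMMAS AND PROOFS =====
theorem blockersB_shift (trees : List Int) (center : Int) (i : Nat) :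
    blockersB i trees center = (blockersB 0 trees center).map (· + i) := by
  induction trees generalizing i with
  | nil => simp [blockersB]
  | cons t rest ih =>
    by_cases h : t ≥ center
    · simp [blockersB, if_pos h, ih (i + 1), ih 1, List.map_map]
      intro a _; omega
    · simp [blockersB, if_neg h, ih (i + 1), ih 1, List.map_map]
      intro a _; omega

theorem foldl_min_succ (as : List Nat) (a : Nat) :
    List.foldl min (a + 1) (as.map (· + 1)) = List.foldl min a as + 1 := by
  induction as generalizing a with
  | nil => simp
  | cons b bs ih =>
    simp only [List.map_cons, List.foldl_cons]
    rw [show min (a + 1) (b + 1) = min a b + 1 by omega, ih]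

theorem min?_map_succ (l : List Nat) :
    (l.map (· + 1)).min? = l.min?.map (· + 1) := by
  cases l with
  | nil => simp
  | cons a as => simp [List.min?, foldl_min_succ]

theorem foldl_min_zero (l : List Nat) : List.foldl min 0 l = 0 := by
  induction l with
  | nil => rfl
  | cons a as ih => simpa [Nat.zero_min] using ih

theorem alt_cons_lt (tree : Int) (rest : List Int) (center : Int) (h : tree < center) :
    is_shorter_alt (tree :: rest) center = 1 :: is_shorter_alt rest center := by
  simp only [is_shorter_alt, blockersB, if_neg (by omega : ¬ tree ≥ center)]
  rw [blockersB_shift rest center 1, min?_map_succ]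
  cases (blockersB 0 rest center).min? <;>
    simp [List.replicate_succ]

theorem alt_cons_ge (tree : Int) (rest : List Int) (center : Int) (h : tree ≥ center) :
    is_shorter_alt (tree :: rest) center = [1] := by
  simp only [is_shorter_alt, blockersB, if_pos h]
  rw [blockersB_shift rest center 1]
  simp [List.min?, foldl_min_zero]

theorem loopA_eq (trees : List Int) (center : Int) (acc : List Int) :
    isShorterLoopA trees center acc = acc ++ is_shorter_alt trees center := by
  induction trees generalizing acc with
  | nil => simp [isShorterLoopA, is_shorter_alt, blockersB]
  | cons tree rest ih =>
    by_cases h : tree < center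
    · rw [show isShorterLoopA (tree :: rest) center acc
            = isShorterLoopA rest center (acc ++ [1]) by simp [isShorterLoopA, h],
          ih, alt_cons_lt tree rest center h]
      simp
    · rw [show isShorterLoopA (tree :: rest) center acc = acc ++ [1] by
            simp [isShorterLoopA, h],
          alt_cons_ge tree rest center (by omega)]

-- ===== VERDICT =====
theorem is_shorter_spec : Claim_equal_is_shorter := by
  intro trees center _
  unfold Spec_is_shorter is_shorter
  simp [loopA_eq]
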